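-- pv_equiv track=rewrite | github.com/collij22/agent-swarm-orchestration | lib/session_analysis_enhanced.py | _suggest_agent_for_requirement
-- ===== SOURCE A (Python) =====
-- def _suggest_agent_for_requirement(description: str) -> str:
--     """Suggest the best agent based on requirement description"""
--     desc_lower = description.lower()
--
--     if any(term in desc_lower for term in ['ui', 'interface', 'frontend', 'react']):
--         return "frontend-specialist"
--     elif any(term in desc_lower for term in ['api', 'endpoint', 'rest', 'graphql']):
--         return "api-integrator"
--     elif any(term in desc_lower for term in ['database', 'sql', 'migration', 'schema']):
--         return "database-expert"
--     elif any(term in desc_lower for term in ['test', 'quality', 'security']):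
--         return "quality-guardian"
--     elif any(term in desc_lower for term in ['deploy', 'docker', 'ci/cd', 'infrastructure']):
--         return "devops-engineer"
--     elif any(term in desc_lower for term in ['ai', 'ml', 'gpt', 'llm']):
--         return "ai-specialist"
--     else:
--         return "rapid-builder"
-- ===== SOURCE B (Python) =====
-- # Flat keyword -> (priority, agent) map; exhaustive scan keeping the minimum-priority match.
-- _KEYWORD_AGENT = {
--     'ui': (0, 'frontend-specialist'), 'interface': (0, 'frontend-specialist'),
--     'frontend': (0, 'frontend-specialist'), 'react': (0, 'frontend-specialist'),
--     'api': (1, 'api-integrator'), 'endpoint': (1, 'api-integrator'),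
--     'rest': (1, 'api-integrator'), 'graphql': (1, 'api-integrator'),
--     'database': (2, 'database-expert'), 'sql': (2, 'database-expert'),
--     'migration': (2, 'database-expert'), 'schema': (2, 'database-expert'),
--     'test': (3, 'quality-guardian'), 'quality': (3, 'quality-guardian'),
--     'security': (3, 'quality-guardian'),
--     'deploy': (4, 'devops-engineer'), 'docker': (4, 'devops-engineer'),
--     'ci/cd': (4, 'devops-engineer'), 'infrastructure': (4, 'devops-engineer'),
--     'ai': (5, 'ai-specialist'), 'ml': (5, 'ai-specialist'),
--     'gpt': (5, 'ai-specialist'), 'llm': (5, 'ai-specialist'),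
-- }
--
-- def _suggest_agent_for_requirement(description: str) -> str:
--     """Suggest the best agent based on requirement description"""
--     desc_lower = description.lower()
--     best = None
--     for kw, (rank, agent) in _KEYWORD_AGENT.items():
--         if kw in desc_lower and (best is None or rank < best[0]):
--             best = (rank, agent)
--     return best[1] if best is not None else 'rapid-builder'
-- ===== Notes on version B (the rewrite author's own statement) =====
-- stated objective: alternative
-- what changed: Replaces the ordered short-circuiting if/elif chain over keyword groups by one exhaustive pass over a flat keyword->(priority, agent) map that keeps the minimum-priority matching keyword (argmin scan), returning its agent or the default.
import Mathlib
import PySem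

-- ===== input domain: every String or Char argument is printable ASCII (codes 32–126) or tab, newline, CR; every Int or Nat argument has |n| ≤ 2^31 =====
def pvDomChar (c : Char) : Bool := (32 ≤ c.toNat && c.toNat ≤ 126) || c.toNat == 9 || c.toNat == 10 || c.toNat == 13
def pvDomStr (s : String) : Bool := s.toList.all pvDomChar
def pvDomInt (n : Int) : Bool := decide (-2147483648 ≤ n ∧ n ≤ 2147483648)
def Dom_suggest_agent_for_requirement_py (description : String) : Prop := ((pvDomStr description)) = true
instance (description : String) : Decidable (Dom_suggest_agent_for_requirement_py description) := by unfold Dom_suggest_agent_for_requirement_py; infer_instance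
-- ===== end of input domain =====

-- B replaces A's if/elif chain by an exhaustive argmin scan over a flat keyword->(priority, agent) map (objective: alternative).

-- ===== PORT A =====
def suggest_agent_for_requirement_py (description : String) : String :=
  let desc_lower := PySem.Str.lower description
  if (["ui", "interface", "frontend", "react"].any (fun term => PySem.Str.isIn term desc_lower)) then
    "frontend-specialist"
  else if (["api", "endpoint", "rest", "graphql"].any (fun term => PySem.Str.isIn term desc_lower)) then
    "api-integrator"
  else if (["database", "sql", "migration", "schema"].any (fun term => PySem.Str.isIn term desc_lower)) then
    "database-expert"
  else if (["test", "quality", "security"].any (fun term => PySem.Str.isIn term desc_lower)) then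
    "quality-guardian"
  else if (["deploy", "docker", "ci/cd", "infrastructure"].any (fun term => PySem.Str.isIn term desc_lower)) then
    "devops-engineer"
  else if (["ai", "ml", "gpt", "llm"].any (fun term => PySem.Str.isIn term desc_lower)) then
    "ai-specialist"
  else
    "rapid-builder"

-- ===== PORT B =====
-- flat dict keyword -> (priority, agent), insertion order as in Source B
def pvKeywordAgent : List (String × Nat × String) :=
  [("ui", 0, "frontend-specialist"), ("interface", 0, "frontend-specialist"),
   ("frontend", 0, "frontend-specialist"), ("react", 0, "frontend-specialist"),
   ("api", 1, "api-integrator"), ("endpoint", 1, "api-integrator"),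
   ("rest", 1, "api-integrator"), ("graphql", 1, "api-integrator"),
   ("database", 2, "database-expert"), ("sql", 2, "database-expert"),
   ("migration", 2, "database-expert"), ("schema", 2, "database-expert"),
   ("test", 3, "quality-guardian"), ("quality", 3, "quality-guardian"),
   ("security", 3, "quality-guardian"),
   ("deploy", 4, "devops-engineer"), ("docker", 4, "devops-engineer"),
   ("ci/cd", 4, "devops-engineer"), ("infrastructure", 4, "devops-engineer"),
   ("ai", 5, "ai-specialist"), ("ml", 5, "ai-specialist"),
   ("gpt", 5, "ai-specialist"), ("llm", 5, "ai-specialist")]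

-- loop body: 'if kw in desc_lower and (best is None or rank < best[0]): best = (rank, agent)'
def pvStep (d : String) (best : Option (Nat × String)) (e : String × Nat × String) : Option (Nat × String) :=
  if PySem.Str.isIn e.1 d && (match best with | none => true | some br => decide (e.2.1 < br.1)) then
    some e.2
  else best

def suggest_agent_for_requirement_py_alt (description : String) : String :=
  let desc_lower := PySem.Str.lower description
  match pvKeywordAgent.foldl (pvStep desc_lower) none with
  | some br => br.2
  | none => "rapid-builder"

-- ===== PRECONDITION & SPEC =====
def Spec_suggest_agent_for_requirement_py (description : String) (out : String) : Prop := out = suggest_agent_for_requirement_py_alt description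
instance (description : String) (out : String) : Decidable (Spec_suggest_agent_for_requirement_py description out) := by unfold Spec_suggest_agent_for_requirement_py; infer_instance

-- ===== CLAIM (what is proved, stated in full; the proofs are below) =====
def Claim_equal_suggest_agent_for_requirement_py : Prop := ∀ (description : String), Dom_suggest_agent_for_requirement_py description → Spec_suggest_agent_for_requirement_py description (suggest_agent_for_requirement_py description)

-- ===== LEMMAS AND PROOFS =====

-- a group of keywords sharing one (priority, agent)
def pvGroup (r : Nat) (a : String) (kws : List String) : List (String × Nat × String) :=
  kws.map (fun k => (k, r, a))

-- the groups, in priority order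
def pvGroups : List (Nat × String × List String) :=
  [(0, "frontend-specialist", ["ui", "interface", "frontend", "react"]),
   (1, "api-integrator", ["api", "endpoint", "rest", "graphql"]),
   (2, "database-expert", ["database", "sql", "migration", "schema"]),
   (3, "quality-guardian", ["test", "quality", "security"]),
   (4, "devops-engineer", ["deploy", "docker", "ci/cd", "infrastructure"]),
   (5, "ai-specialist", ["ai", "ml", "gpt", "llm"])]

-- specification of the scan: the first group with a matching keyword
def pvFirst (d : String) : List (Nat × String × List String) → Option (Nat × String)
  | [] => none
  | (r, a, kws) :: rest =>
      if kws.any (fun k => PySem.Str.isIn k d) then some (r, a) else pvFirst d rest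

-- once best has priority r and every remaining priority is ≥ r, the fold keeps best
theorem pv_fold_keep (d : String) (r : Nat) (a : String) (l : List (String × Nat × String))
    (h : ∀ e ∈ l, r ≤ e.2.1) :
    l.foldl (pvStep d) (some (r, a)) = some (r, a) := by
  induction l with
  | nil => rfl
  | cons e rest ih =>
      have hr : r ≤ e.2.1 := h e (List.mem_cons_self ..)
      have hstep : pvStep d (some (r, a)) e = some (r, a) := by
        unfold pvStep
        simp [Nat.not_lt.mpr hr]
      rw [List.foldl_cons, hstep]
      exact ih (fun e' he' => h e' (List.mem_cons_of_mem _ he'))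

-- folding a single group from none: some (r, a) iff some keyword matches
theorem pv_fold_group (d : String) (r : Nat) (a : String) (kws : List String) :
    (pvGroup r a kws).foldl (pvStep d) none
      = if kws.any (fun k => PySem.Str.isIn k d) then some (r, a) else none := by
  induction kws with
  | nil => rfl
  | cons k rest ih =>
      by_cases hk : PySem.Str.isIn k d = true
      · have hk' : PySem.Chars.isIn k.toList d.toList = true := hk
        have hstep : pvStep d none (k, r, a) = some (r, a) := by
          unfold pvStep; simp [PySem.Str.isIn, hk']
        simp only [pvGroup, List.map_cons, List.foldl_cons, hstep, List.any_cons, hk,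
          Bool.true_or, if_pos]
        exact pv_fold_keep d r a _ (by
          intro e he
          simp only [List.mem_map] at he
          obtain ⟨k', _, rfl⟩ := he
          exact le_refl r)
      · have hk' : PySem.Chars.isIn k.toList d.toList = false := by
          simpa [PySem.Str.isIn] using hk
        have hstep : pvStep d none (k, r, a) = none := by
          unfold pvStep; simp [PySem.Str.isIn, hk']
        have hkf : PySem.Str.isIn k d = false := Bool.eq_false_iff.mpr hk
        simp only [pvGroup, List.map_cons, List.foldl_cons, hstep, List.any_cons]
        simp only [hkf, Bool.false_or]
        exact ih

-- the argmin scan over sorted concatenated groups returns the first matching group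
theorem pv_chain (d : String) (gs : List (Nat × String × List String))
    (hmono : gs.Pairwise (fun g g' => g.1 ≤ g'.1)) :
    (gs.flatMap (fun g => pvGroup g.1 g.2.1 g.2.2)).foldl (pvStep d) none = pvFirst d gs := by
  induction gs with
  | nil => rfl
  | cons g rest ih =>
      obtain ⟨r, a, kws⟩ := g
      rw [List.flatMap_cons, List.foldl_append, pv_fold_group]
      by_cases hm : (kws.any (fun k => PySem.Str.isIn k d)) = true
      · rw [if_pos hm]
        have hkeep : (rest.flatMap (fun g => pvGroup g.1 g.2.1 g.2.2)).foldl
            (pvStep d) (some (r, a)) = some (r, a) := by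
          apply pv_fold_keep
          intro e he
          simp only [List.mem_flatMap] at he
          obtain ⟨g', hg', he'⟩ := he
          have hle : r ≤ g'.1 := (List.pairwise_cons.mp hmono).1 g' hg'
          simp only [pvGroup, List.mem_map] at he'
          obtain ⟨k', _, rfl⟩ := he'
          exact hle
        rw [hkeep]
        simp only [pvFirst]
        rw [if_pos hm]
      · rw [if_neg hm]
        rw [ih (List.pairwise_cons.mp hmono).2]
        simp only [pvFirst]
        rw [if_neg hm]

theorem pv_flat_eq :
    pvKeywordAgent = pvGroups.flatMap (fun g => pvGroup g.1 g.2.1 g.2.2) := by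
  rfl

-- ===== VERDICT (by name: the statement is the Claim_ definition above) =====
theorem suggest_agent_for_requirement_py_spec : Claim_equal_suggest_agent_for_requirement_py := by
  intro description _
  unfold Spec_suggest_agent_for_requirement_py suggest_agent_for_requirement_py
    suggest_agent_for_requirement_py_alt
  set d := PySem.Str.lower description with hd
  simp only [pv_flat_eq, pv_chain d pvGroups (by decide)]
  simp only [pvGroups, pvFirst]
  split_ifs <;> rfl
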